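-- pv_equiv track=rewrite | github.com/dyoung11/PAU4Chem-1 | transform/building_pau_db.py | _searching_naics
-- ===== SOURCE A (Python) =====
-- def _searching_naics(x, naics):
--     # https://www.census.gov/programs-surveys/economic-census/guidance/understanding-naics.html
--     values = {0: 'Nothing', 1: 'Nothing', 2: 'Sector', 3: 'Subsector',
--               4: 'Industry Group', 5: 'NAICS Industry',
--               6: 'National Industry'}
--     naics = str(naics)
--     x = str(x)
--     equal = 0
--     for idx, char in enumerate(naics):
--         try:
--             if char == x[idx]:
--                 equal = equal + 1
--             else:
--                 break
--         except IndexError: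
--             break
--     return values[equal]
-- ===== SOURCE B (Python) =====
-- def _searching_naics(x, naics):
--     labels = ['Nothing', 'Nothing', 'Sector', 'Subsector',
--               'Industry Group', 'NAICS Industry', 'National Industry']
--     s = str(x)
--     t = str(naics)
--     equal = len(s)
--     while not t.startswith(s[:equal]):
--         equal -= 1
--     return labels[equal]
-- ===== Notes on version B (the rewrite author's own statement) =====
-- stated objective: simpler
-- what changed: B replaces the per-character enumerate loop with try/except IndexError and the 0-6 dict by a shrinking-prefix search: it starts from the full str(x) and decrements until t.startswith(s[:equal]), then indexes a plain 7-element list; the label lookup raises (IndexError vs KeyError) on the same inputs A raises, which Pre_ excludes.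
import Mathlib
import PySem

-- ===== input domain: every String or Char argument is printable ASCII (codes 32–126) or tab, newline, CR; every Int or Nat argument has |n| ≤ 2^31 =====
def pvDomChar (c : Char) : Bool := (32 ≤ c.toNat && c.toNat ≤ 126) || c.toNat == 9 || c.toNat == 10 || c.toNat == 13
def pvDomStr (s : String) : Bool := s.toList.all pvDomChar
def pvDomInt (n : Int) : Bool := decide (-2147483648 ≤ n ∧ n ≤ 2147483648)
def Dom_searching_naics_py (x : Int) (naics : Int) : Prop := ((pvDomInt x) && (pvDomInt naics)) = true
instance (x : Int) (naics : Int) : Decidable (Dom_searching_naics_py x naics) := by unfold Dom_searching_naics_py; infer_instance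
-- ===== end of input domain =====

-- B replaces A's per-character enumerate loop (with try/except IndexError and a 0-6 dict)
-- by a shrinking-prefix search over startswith and a plain list lookup; objective: simpler.
-- Both raise (KeyError / IndexError) when the common prefix length exceeds 6; Pre_ excludes those inputs.

-- ===== PORT A =====
def pvValues : PySem.Dict Int String :=
  PySem.Dict.ofList [(0, "Nothing"), (1, "Nothing"), (2, "Sector"), (3, "Subsector"),
                     (4, "Industry Group"), (5, "NAICS Industry"), (6, "National Industry")]

-- the 'for idx, char in enumerate(naics)' loop with break / except IndexError → break
def pvALoop (xs : List Char) : List Char → Int → Int → Int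
  | [], _, equal => equal
  | c :: rest, idx, equal =>
    match PySem.List.pyGet? xs idx with
    | none => equal                                   -- except IndexError: break
    | some xc => if c = xc then pvALoop xs rest (idx + 1) (equal + 1) else equal

def searching_naics_py (x : Int) (naics : Int) : String :=
  let ns := (PySem.Int.toStr naics).toList
  let xs := (PySem.Int.toStr x).toList
  let equal := pvALoop xs ns 0 0
  (pvValues.get? equal).getD ""                       -- values[equal]; Pre_ guarantees the key exists

-- ===== PORT B =====
def pvLabels : List String :=
  ["Nothing", "Nothing", "Sector", "Subsector", "Industry Group", "NAICS Industry", "National Industry"]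

-- 'while not t.startswith(s[:equal]): equal -= 1' (terminates: the empty prefix always matches)
def pvBLoop (s t : List Char) : Nat → Nat
  | 0 => 0
  | e + 1 => if PySem.Chars.startswith t (s.take (e + 1)) then e + 1 else pvBLoop s t e

def searching_naics_py_alt (x : Int) (naics : Int) : String :=
  let s := (PySem.Int.toStr x).toList
  let t := (PySem.Int.toStr naics).toList
  let equal := pvBLoop s t s.length
  (PySem.List.pyGet? pvLabels ((equal : Nat) : Int)).getD ""   -- labels[equal]; Pre_ keeps it in range

-- ===== PRECONDITION & SPEC =====
-- common prefix length of the two decimal representations (helper for Pre_ and the proofs)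
def pvLcp : List Char → List Char → Nat
  | a :: as, b :: bs => if a = b then pvLcp as bs + 1 else 0
  | _, _ => 0

-- Pre_ excludes exactly the inputs whose decimal strings share a prefix of length ≥ 7:
-- there A raises KeyError (values has keys 0..6 only) and B raises IndexError.
def Pre_searching_naics_py (x : Int) (naics : Int) : Prop :=
  pvLcp ((PySem.Int.toStr x).toList) ((PySem.Int.toStr naics).toList) ≤ 6
instance (x : Int) (naics : Int) : Decidable (Pre_searching_naics_py x naics) := by
  unfold Pre_searching_naics_py; infer_instance

def pvWitness_searching_naics_py : Int × Int := (311, 3114)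

def Spec_searching_naics_py (x : Int) (naics : Int) (out : String) : Prop := out = searching_naics_py_alt x naics
instance (x : Int) (naics : Int) (out : String) : Decidable (Spec_searching_naics_py x naics out) := by unfold Spec_searching_naics_py; infer_instance

-- ===== CLAIM (what is proved, stated in full; the proofs are below) =====
def Claim_equal_searching_naics_py : Prop := ∀ (x : Int) (naics : Int), Dom_searching_naics_py x naics → Pre_searching_naics_py x naics → Spec_searching_naics_py x naics (searching_naics_py x naics)

-- ===== LEMMAS AND PROOFS =====

theorem pvLcp_le_left : ∀ s t : List Char, pvLcp s t ≤ s.length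
  | [], t => by simp [pvLcp]
  | a :: as, [] => by simp [pvLcp]
  | a :: as, b :: bs => by
    simp only [pvLcp]
    split_ifs
    · have := pvLcp_le_left as bs; simpa [Nat.succ_le_succ_iff] using this
    · simp

-- A's loop counts the common prefix of xs (from position idx) and ns
theorem pvALoop_eq : ∀ (ns : List Char) (xs : List Char) (idx : Nat) (equal : Int),
    pvALoop xs ns ((idx : Nat) : Int) equal = equal + ((pvLcp (xs.drop idx) ns : Nat) : Int)
  | [], xs, idx, equal => by cases xs.drop idx <;> simp [pvALoop, pvLcp]
  | c :: rest, xs, idx, equal => by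
    have hd : (xs.drop idx).head? = xs[idx]? := (List.head?_drop (l := xs) (i := idx))
    rw [show pvALoop xs (c :: rest) ((idx : Nat) : Int) equal =
        (match PySem.List.pyGet? xs ((idx : Nat) : Int) with
         | none => equal
         | some xc => if c = xc then pvALoop xs rest (((idx : Nat) : Int) + 1) (equal + 1) else equal) from rfl]
    rw [PySem.List.pyGet?_natCast]
    cases hdrop : xs.drop idx with
    | nil =>
      have : xs[idx]? = none := by rw [← hd, hdrop]; rfl
      simp [this, pvLcp]
    | cons xc d' =>
      have hx : xs[idx]? = some xc := by rw [← hd, hdrop]; rfl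
      have hdrop1 : xs.drop (idx + 1) = d' := by
        have : (xs.drop idx).tail = xs.drop (idx + 1) := by
          rw [← List.drop_drop]; simp
        rw [← this, hdrop]; rfl
      simp only [hx]
      by_cases hc : c = xc
      · have ih := pvALoop_eq rest xs (idx + 1) (equal + 1)
        rw [hdrop1] at ih
        rw [if_pos hc, show ((idx : Int) + 1) = ((idx + 1 : Nat) : Int) by push_cast; ring]
        rw [ih, pvLcp, if_pos hc.symm]
        omega
      · rw [if_neg hc, pvLcp, if_neg (fun h => hc h.symm)]
        simp

-- take k is a prefix of t iff k ≤ lcp (for k ≤ s.length)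
theorem take_prefix_iff : ∀ (k : Nat) (s t : List Char), k ≤ s.length →
    (s.take k <+: t ↔ k ≤ pvLcp s t)
  | 0, s, t, _ => by simp
  | k + 1, [], t, h => by simp at h
  | k + 1, a :: as, [], h => by
    simp only [pvLcp, List.take_succ_cons]
    constructor
    · intro hpre
      simp [List.prefix_nil] at hpre
    · omega
  | k + 1, a :: as, b :: bs, h => by
    simp only [List.take_succ_cons, pvLcp, List.cons_prefix_cons]
    constructor
    · rintro ⟨hab, hu⟩
      subst hab
      rw [if_pos rfl]
      have := (take_prefix_iff k as bs (by simpa using h)).mp hu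
      omega
    · intro hk
      split_ifs at hk with hab
      · subst hab
        exact ⟨rfl, (take_prefix_iff k as bs (by simpa using h)).mpr (by omega)⟩
      · omega

-- B's loop from e returns min e (lcp) when e ≤ s.length
theorem pvBLoop_eq : ∀ (e : Nat) (s t : List Char), e ≤ s.length →
    pvBLoop s t e = min e (pvLcp s t)
  | 0, s, t, _ => by simp [pvBLoop]
  | e + 1, s, t, h => by
    rw [show pvBLoop s t (e + 1) =
        (if PySem.Chars.startswith t (s.take (e + 1)) then e + 1 else pvBLoop s t e) from rfl]
    by_cases hp : s.take (e + 1) <+: t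
    · have : PySem.Chars.startswith t (s.take (e + 1)) = true :=
        (PySem.Chars.startswith_iff _ _).mpr hp
      rw [if_pos this]
      have := (take_prefix_iff (e + 1) s t h).mp hp
      omega
    · have : PySem.Chars.startswith t (s.take (e + 1)) = false := by
        cases hb : PySem.Chars.startswith t (s.take (e + 1))
        · rfl
        · exact absurd ((PySem.Chars.startswith_iff _ _).mp hb) hp
      rw [this, if_neg (by simp)]
      have hlt : ¬ (e + 1 ≤ pvLcp s t) := fun hk => hp ((take_prefix_iff (e + 1) s t h).mpr hk)
      rw [pvBLoop_eq e s t (by omega)]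
      omega

theorem lookup_eq (k : Nat) (hk : k ≤ 6) :
    (pvValues.get? ((k : Nat) : Int)).getD "" = (PySem.List.pyGet? pvLabels ((k : Nat) : Int)).getD "" := by
  interval_cases k <;> decide

-- ===== VERDICT (by name: the statement is the Claim_ definition above) =====
theorem searching_naics_py_spec : Claim_equal_searching_naics_py := by
  intro x naics _ hpre
  unfold Spec_searching_naics_py searching_naics_py searching_naics_py_alt
  set xs := (PySem.Int.toStr x).toList with hxs
  set ns := (PySem.Int.toStr naics).toList with hns
  have hA : pvALoop xs ns 0 0 = ((pvLcp xs ns : Nat) : Int) := by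
    simpa using pvALoop_eq ns xs 0 0
  have hB : pvBLoop xs ns xs.length = pvLcp xs ns := by
    rw [pvBLoop_eq xs.length xs ns le_rfl]
    have := pvLcp_le_left xs ns
    omega
  simp only [hA, hB]
  exact lookup_eq (pvLcp xs ns) (by exact hpre)
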